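-- pv_equiv track=rewrite | github.com/lacortina/TB | solape.py | generate_possible_params
-- ===== SOURCE A (Python) =====
-- param_requires = {
--     'Vss': ('s','s'),
--     'Vsp': ('s','p'),
--     'Vsds': ('s','d'),
--     'Vpp_sigma': ('p','p'),
--     'Vpp_pi': ('p','p'),
--     'Vpds': ('p','d'),
--     'Vpdp': ('p','d'),
--     'Vdds': ('d','d'),
--     'Vddp': ('d','d'),
--     'Vddd': ('d','d'),
-- }
--
-- def orbital_types_from_list(orb_list):
--     tset = set()
--     for orb in orb_list:
--         if not orb: continue
--         c = orb[0].lower()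
--         if c in ('s','p','d'):
--             tset.add(c)
--     return tset
--
-- def generate_possible_params(types_list, orb_map):
--     """
--     Genera todas las claves posibles (incluye onsite y pares).
--     """
--     params = set()
--     params.update(["Delta", "m", "tol"])
--
--     # Onsite
--     for t in types_list:
--         orbs = orb_map.get(t, [])
--         tset = orbital_types_from_list(orbs)
--         if 's' in tset:
--             params.add(f"E_s_{t}")
--         if 'p' in tset:
--             params.add(f"E_p_{t}")
--         if 'd' in tset:
--             params.add(f"E_d_{t}")
--
--     # Pares (con distinción según tipo de orbital requerido)
--     for A in types_list:
--         for B in types_list: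
--             la = orbital_types_from_list(orb_map.get(A, []))
--             lb = orbital_types_from_list(orb_map.get(B, []))
--             if not la or not lb:
--                 continue
--
--             for pname, (req1, req2) in param_requires.items():
--                 if req1 == req2:
--                     if req1 in la and req2 in lb:
--                         pk = "_".join(sorted([A, B]))
--                         params.add(f"{pname}_{pk}")
--                 else:
--                     if req1 in la and req2 in lb:
--                         params.add(f"{pname}_{A}_{B}")
--                     if A != B and req2 in la and req1 in lb:
--                         params.add(f"{pname}_{A}_{B}")
--
--     return params
-- ===== SOURCE B (Python) =====
-- param_requires = {
--     'Vss': ('s','s'),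
--     'Vsp': ('s','p'),
--     'Vsds': ('s','d'),
--     'Vpp_sigma': ('p','p'),
--     'Vpp_pi': ('p','p'),
--     'Vpds': ('p','d'),
--     'Vpdp': ('p','d'),
--     'Vdds': ('d','d'),
--     'Vddp': ('d','d'),
--     'Vddd': ('d','d'),
-- }
--
-- def orbital_types_from_list(orb_list):
--     tset = set()
--     for orb in orb_list:
--         if not orb: continue
--         c = orb[0].lower()
--         if c in ('s','p','d'):
--             tset.add(c)
--     return tset
--
-- def generate_possible_params(types_list, orb_map):
--     """
--     Genera todas las claves posibles (incluye onsite y pares).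
--     """
--     # inverted index: orbital letter -> types possessing it (one pass over types_list)
--     types_with = {'s': [], 'p': [], 'd': []}
--     keys = ["Delta", "m", "tol"]
--     for t in types_list:
--         tset = orbital_types_from_list(orb_map.get(t, []))
--         for c in 'spd':
--             if c in tset:
--                 types_with[c].append(t)
--                 keys.append(f"E_{c}_{t}")
--     # pair keys: iterate the parameter table once, over products of the index lists
--     for pname, (r1, r2) in param_requires.items():
--         if r1 == r2:
--             for A in types_with[r1]:
--                 for B in types_with[r1]:
--                     keys.append(f"{pname}_{min(A, B)}_{max(A, B)}")
--         else:
--             for A in types_with[r1]: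
--                 for B in types_with[r2]:
--                     keys.append(f"{pname}_{A}_{B}")
--             for X in types_with[r2]:
--                 for Y in types_with[r1]:
--                     if X != Y:
--                         keys.append(f"{pname}_{X}_{Y}")
--     return set(keys)
-- ===== Notes on version B (the rewrite author's own statement) =====
-- stated objective: faster
-- what changed: B builds an inverted index orbital-letter -> list of types in one pass (emitting onsite keys during that pass), then generates pair keys pname-major by iterating the parameter table once over cartesian products of the index lists, instead of A's all-ordered-pairs double loop that recomputes both orbital sets and rescans the whole parameter table for every type pair.
import Mathlib
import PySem

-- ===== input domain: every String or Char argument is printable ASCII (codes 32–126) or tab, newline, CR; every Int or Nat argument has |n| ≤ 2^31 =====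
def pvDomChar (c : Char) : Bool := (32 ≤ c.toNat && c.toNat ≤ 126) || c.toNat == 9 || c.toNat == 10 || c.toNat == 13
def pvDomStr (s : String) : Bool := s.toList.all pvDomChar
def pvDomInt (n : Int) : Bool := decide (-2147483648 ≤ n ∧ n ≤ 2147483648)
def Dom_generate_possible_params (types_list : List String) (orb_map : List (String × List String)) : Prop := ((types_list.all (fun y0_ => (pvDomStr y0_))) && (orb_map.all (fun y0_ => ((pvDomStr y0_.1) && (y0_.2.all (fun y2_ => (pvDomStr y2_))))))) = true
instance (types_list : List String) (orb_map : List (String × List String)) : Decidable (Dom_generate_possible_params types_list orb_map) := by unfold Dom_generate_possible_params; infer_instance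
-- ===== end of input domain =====

-- B replaces A's all-pairs double loop (which recomputes both orbital sets per ordered pair) by an inverted
-- index orbital-letter -> types built in one pass, then emits pair keys pname-major over products of the index
-- lists, avoiding the quadratic set recomputation (objective: faster, measured).
-- Both Pythons return a set, whose iteration order Python does not specify (and PySem does not model);
-- both ports therefore return the set canonically, as its sorted list of distinct elements — exact as a set.

-- ===== PORT A =====
-- Python's set of the 1-char strings 's'/'p'/'d' is represented as a PySem.Set Char (bijective; exact).
def orbital_types_from_list (orb_list : List String) : PySem.Set Char :=
  orb_list.foldl (fun tset orb =>
    match orb.toList with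
    | [] => tset                                   -- `if not orb: continue`
    | c0 :: _ =>                                   -- c = orb[0].lower()
      let c := PySem.Chars.lowerChar c0
      if c = 's' ∨ c = 'p' ∨ c = 'd' then PySem.Set.add tset c else tset)
    PySem.Set.empty

def param_requires : List (String × Char × Char) :=
  [("Vss", 's', 's'), ("Vsp", 's', 'p'), ("Vsds", 's', 'd'),
   ("Vpp_sigma", 'p', 'p'), ("Vpp_pi", 'p', 'p'),
   ("Vpds", 'p', 'd'), ("Vpdp", 'p', 'd'),
   ("Vdds", 'd', 'd'), ("Vddp", 'd', 'd'), ("Vddd", 'd', 'd')]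

def generate_possible_params (types_list : List String) (orb_map : List (String × List String)) : List String :=
  let params : PySem.Set String := PySem.Set.update PySem.Set.empty ["Delta", "m", "tol"]
  -- Onsite
  let params := types_list.foldl (fun params t =>
    let orbs := (PySem.Dict.mk orb_map).getD t []
    let tset := orbital_types_from_list orbs
    let params := if PySem.Set.contains tset 's' then PySem.Set.add params ("E_s_" ++ t) else params
    let params := if PySem.Set.contains tset 'p' then PySem.Set.add params ("E_p_" ++ t) else params
    if PySem.Set.contains tset 'd' then PySem.Set.add params ("E_d_" ++ t) else params) params
  -- Pares
  let params := types_list.foldl (fun params A =>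
    types_list.foldl (fun params B =>
      let la := orbital_types_from_list ((PySem.Dict.mk orb_map).getD A [])
      let lb := orbital_types_from_list ((PySem.Dict.mk orb_map).getD B [])
      if la.isEmpty || lb.isEmpty then params
      else
        param_requires.foldl (fun params pr =>
          if pr.2.1 = pr.2.2 then
            if PySem.Set.contains la pr.2.1 && PySem.Set.contains lb pr.2.2 then
              PySem.Set.add params (pr.1 ++ "_" ++ PySem.Str.join "_" (PySem.List.sorted [A, B] (fun x => x) false))
            else params
          else
            let params := if PySem.Set.contains la pr.2.1 && PySem.Set.contains lb pr.2.2 then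
                PySem.Set.add params (pr.1 ++ "_" ++ A ++ "_" ++ B) else params
            if A != B && PySem.Set.contains la pr.2.2 && PySem.Set.contains lb pr.2.1 then
              PySem.Set.add params (pr.1 ++ "_" ++ A ++ "_" ++ B) else params) params) params) params
  -- the returned set, listed canonically (Python's set iteration order is not modelled)
  PySem.List.sorted params (fun x => x) false

-- ===== PORT B =====
def generate_possible_params_alt (types_list : List String) (orb_map : List (String × List String)) : List String :=
  -- inverted index: orbital letter -> types possessing it (one pass); state = (types_with, keys)
  let st := types_list.foldl (fun st t =>
      let tset := orbital_types_from_list ((PySem.Dict.mk orb_map).getD t [])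
      "spd".toList.foldl (fun st c =>
        if PySem.Set.contains tset c then
          (st.1.modify c [] (fun l => l ++ [t]), st.2 ++ ["E_" ++ String.singleton c ++ "_" ++ t])
        else st) st)
    (PySem.Dict.mk [('s', []), ('p', []), ('d', [])], ["Delta", "m", "tol"])
  let tw := st.1
  -- pair keys: one pass over the parameter table, over products of the index lists
  let keys := param_requires.foldl (fun keys pr =>
    if pr.2.1 = pr.2.2 then
      (tw.getD pr.2.1 []).foldl (fun keys A =>
        (tw.getD pr.2.1 []).foldl (fun keys B =>
          keys ++ [pr.1 ++ "_" ++ (if B < A then B else A) ++ "_" ++ (if A < B then B else A)]) keys) keys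
    else
      let keys := (tw.getD pr.2.1 []).foldl (fun keys A =>
        (tw.getD pr.2.2 []).foldl (fun keys B =>
          keys ++ [pr.1 ++ "_" ++ A ++ "_" ++ B]) keys) keys
      (tw.getD pr.2.2 []).foldl (fun keys X =>
        (tw.getD pr.2.1 []).foldl (fun keys Y =>
          if X != Y then keys ++ [pr.1 ++ "_" ++ X ++ "_" ++ Y] else keys) keys) keys) st.2
  -- set(keys), listed canonically (Python's set iteration order is not modelled)
  PySem.List.sorted (PySem.Set.ofList keys) (fun x => x) false

-- ===== PRECONDITION & SPEC =====
def Spec_generate_possible_params (types_list : List String) (orb_map : List (String × List String)) (out : List String) : Prop := out = generate_possible_params_alt types_list orb_map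
instance (types_list : List String) (orb_map : List (String × List String)) (out : List String) : Decidable (Spec_generate_possible_params types_list orb_map out) := by unfold Spec_generate_possible_params; infer_instance

-- ===== CLAIM (what is proved, stated in full; the proofs are below) =====
def Claim_equal_generate_possible_params : Prop := ∀ (types_list : List String) (orb_map : List (String × List String)), Dom_generate_possible_params types_list orb_map → Spec_generate_possible_params types_list orb_map (generate_possible_params types_list orb_map)

-- ===== LEMMAS AND PROOFS =====

-- the orbital set A recomputes from orb_map, as a function of the type name
def pvF (orb_map : List (String × List String)) (t : String) : PySem.Set Char :=
  orbital_types_from_list ((PySem.Dict.mk orb_map).getD t [])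

-- onsite keys for one type
def pvOnsiteKeys (tset : PySem.Set Char) (t : String) : List String :=
  ("spd".toList.filter (fun c => PySem.Set.contains tset c)).map
    (fun c => "E_" ++ String.singleton c ++ "_" ++ t)

-- the keys one param_requires entry contributes for the ordered type pair (A, B) in A's loop body
def pvE1 (A B : String) (la lb : PySem.Set Char) (pr : String × Char × Char) : List String :=
  if pr.2.1 = pr.2.2 then
    (if PySem.Set.contains la pr.2.1 && PySem.Set.contains lb pr.2.2 then
       [pr.1 ++ "_" ++ (if B < A then B else A) ++ "_" ++ (if A < B then B else A)] else [])
  else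
    (if PySem.Set.contains la pr.2.1 && PySem.Set.contains lb pr.2.2 then
       [pr.1 ++ "_" ++ A ++ "_" ++ B] else []) ++
    (if (A != B) && PySem.Set.contains la pr.2.2 && PySem.Set.contains lb pr.2.1 then
       [pr.1 ++ "_" ++ A ++ "_" ++ B] else [])

-- the keys one param_requires entry contributes in B's pname-major pass, given the inverted index W
def pvBP (W : Char → List String) (pr : String × Char × Char) : List String :=
  if pr.2.1 = pr.2.2 then
    (W pr.2.1).flatMap (fun A => (W pr.2.1).flatMap (fun B =>
      [pr.1 ++ "_" ++ (if B < A then B else A) ++ "_" ++ (if A < B then B else A)]))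
  else
    ((W pr.2.1).flatMap (fun A => (W pr.2.2).flatMap (fun B => [pr.1 ++ "_" ++ A ++ "_" ++ B]))) ++
    ((W pr.2.2).flatMap (fun X => (W pr.2.1).flatMap (fun Y =>
      if X != Y then [pr.1 ++ "_" ++ X ++ "_" ++ Y] else [])))

-- B's inverted index as a function
def pvW (types_list : List String) (orb_map : List (String × List String)) (c : Char) : List String :=
  types_list.filter (fun t => PySem.Set.contains (pvF orb_map t) c)

theorem pvJoinTwo (x y : String) : PySem.Str.join "_" [x, y] = x ++ "_" ++ y := by
  apply String.toList_inj.mp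
  simp [PySem.Str.join, PySem.Chars.join, List.intercalate, String.toList_append]

theorem pvSortedJoin (A B : String) :
    PySem.Str.join "_" (PySem.List.sorted [A, B] (fun x => x) false)
      = (if B < A then B else A) ++ "_" ++ (if A < B then B else A) := by
  rcases lt_trichotomy A B with h | h | h
  · have hs : PySem.List.sorted [A, B] (fun x => x) false = [A, B] :=
      PySem.List.sorted_id_eq_of_perm_of_pairwise _ _ (List.Perm.refl _)
        (by simp [String.le_iff_toList_le.mp (le_of_lt h)])
    rw [hs, pvJoinTwo, if_neg (asymm h), if_pos h]
  · subst h
    have hs : PySem.List.sorted [A, A] (fun x => x) false = [A, A] :=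
      PySem.List.sorted_id_eq_of_perm_of_pairwise _ _ (List.Perm.refl _) (by simp)
    rw [hs, pvJoinTwo]
    simp
  · have hs : PySem.List.sorted [A, B] (fun x => x) false = [B, A] :=
      PySem.List.sorted_id_eq_of_perm_of_pairwise _ _ (List.Perm.swap _ _ _)
        (by simp [String.le_iff_toList_le.mp (le_of_lt h)])
    rw [hs, pvJoinTwo, if_pos h, if_neg (asymm h)]

-- a fold of Set.update steps is one Set.update of the flattened emissions
theorem pvFoldUpdate {β : Type} (g : β → List String) :
    ∀ (l : List β) (s : PySem.Set String),
      l.foldl (fun s pr => PySem.Set.update s (g pr)) s = PySem.Set.update s (l.flatMap g) := by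
  intro l
  induction l with
  | nil => intro s; simp [PySem.Set.update]
  | cons a l ih => intro s; simp only [List.foldl_cons, List.flatMap_cons]
                   rw [ih, PySem.Set.update_append]

-- A's onsite body for one type = appending its onsite keys
theorem pvOnsiteStep (tset : PySem.Set Char) (t : String) (s : PySem.Set String) :
    (let p1 := if PySem.Set.contains tset 's' then PySem.Set.add s ("E_s_" ++ t) else s
     let p2 := if PySem.Set.contains tset 'p' then PySem.Set.add p1 ("E_p_" ++ t) else p1
     if PySem.Set.contains tset 'd' then PySem.Set.add p2 ("E_d_" ++ t) else p2)
      = PySem.Set.update s (pvOnsiteKeys tset t) := by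
  by_cases hs : 's' ∈ tset <;> by_cases hp : 'p' ∈ tset <;> by_cases hd : 'd' ∈ tset <;>
    simp [pvOnsiteKeys, hs, hp, hd, PySem.Set.update, List.foldl]

-- A's param_requires loop body for one ordered pair (A, B), as one Set.update
theorem pvPairStep (A B : String) (la lb : PySem.Set Char) (s : PySem.Set String) :
    (if la.isEmpty || lb.isEmpty then s
     else param_requires.foldl (fun params pr =>
        if pr.2.1 = pr.2.2 then
          if PySem.Set.contains la pr.2.1 && PySem.Set.contains lb pr.2.2 then
            PySem.Set.add params (pr.1 ++ "_" ++ PySem.Str.join "_" (PySem.List.sorted [A, B] (fun x => x) false))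
          else params
        else
          let params := if PySem.Set.contains la pr.2.1 && PySem.Set.contains lb pr.2.2 then
              PySem.Set.add params (pr.1 ++ "_" ++ A ++ "_" ++ B) else params
          if A != B && PySem.Set.contains la pr.2.2 && PySem.Set.contains lb pr.2.1 then
            PySem.Set.add params (pr.1 ++ "_" ++ A ++ "_" ++ B) else params) s)
      = PySem.Set.update s (param_requires.flatMap (pvE1 A B la lb)) := by
  have hstep : (fun (params : PySem.Set String) (pr : String × Char × Char) =>
      if pr.2.1 = pr.2.2 then
        if PySem.Set.contains la pr.2.1 && PySem.Set.contains lb pr.2.2 then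
          PySem.Set.add params (pr.1 ++ "_" ++ PySem.Str.join "_" (PySem.List.sorted [A, B] (fun x => x) false))
        else params
      else
        let params := if PySem.Set.contains la pr.2.1 && PySem.Set.contains lb pr.2.2 then
            PySem.Set.add params (pr.1 ++ "_" ++ A ++ "_" ++ B) else params
        if A != B && PySem.Set.contains la pr.2.2 && PySem.Set.contains lb pr.2.1 then
          PySem.Set.add params (pr.1 ++ "_" ++ A ++ "_" ++ B) else params)
      = fun params pr => PySem.Set.update params (pvE1 A B la lb pr) := by
    funext params pr
    simp only [pvE1, pvSortedJoin]
    split_ifs <;> simp_all [PySem.Set.update, List.foldl, String.append_assoc]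
  by_cases hg : la.isEmpty || lb.isEmpty
  · rw [if_pos hg]
    have hla : la = [] ∨ lb = [] := by
      rcases Bool.or_eq_true_iff.mp hg with h | h <;>
        [exact Or.inl (List.isEmpty_iff.mp h); exact Or.inr (List.isEmpty_iff.mp h)]
    have : param_requires.flatMap (pvE1 A B la lb) = [] := by
      rcases hla with h | h <;> subst h <;>
        simp [param_requires, pvE1, PySem.Set.contains]
    rw [this]; simp [PySem.Set.update]
  · rw [if_neg hg, hstep, pvFoldUpdate]

-- A's onsite loop = one Set.update with the flattened onsite keys
theorem pvOnsiteFold (orb_map : List (String × List String)) :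
    ∀ (l : List String) (s : PySem.Set String),
      (l.foldl (fun params t =>
        let orbs := (PySem.Dict.mk orb_map).getD t []
        let tset := orbital_types_from_list orbs
        let params := if PySem.Set.contains tset 's' then PySem.Set.add params ("E_s_" ++ t) else params
        let params := if PySem.Set.contains tset 'p' then PySem.Set.add params ("E_p_" ++ t) else params
        if PySem.Set.contains tset 'd' then PySem.Set.add params ("E_d_" ++ t) else params) s)
      = PySem.Set.update s (l.flatMap (fun t => pvOnsiteKeys (pvF orb_map t) t)) := by
  intro l
  induction l with
  | nil => intro s; simp [PySem.Set.update, List.foldl]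
  | cons a l ih =>
    intro s
    simp only [List.foldl_cons, List.flatMap_cons]
    rw [ih, PySem.Set.update_append]
    congr 1
    exact pvOnsiteStep (pvF orb_map a) a s

-- A's pair double loop = one Set.update with the flattened pair emissions
theorem pvPairOuterFold (orb_map : List (String × List String)) (types_list : List String) :
    ∀ (l : List String) (s : PySem.Set String),
      (l.foldl (fun params A =>
        types_list.foldl (fun params B =>
          let la := orbital_types_from_list ((PySem.Dict.mk orb_map).getD A [])
          let lb := orbital_types_from_list ((PySem.Dict.mk orb_map).getD B [])
          if la.isEmpty || lb.isEmpty then params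
          else
            param_requires.foldl (fun params pr =>
              if pr.2.1 = pr.2.2 then
                if PySem.Set.contains la pr.2.1 && PySem.Set.contains lb pr.2.2 then
                  PySem.Set.add params (pr.1 ++ "_" ++ PySem.Str.join "_" (PySem.List.sorted [A, B] (fun x => x) false))
                else params
              else
                let params := if PySem.Set.contains la pr.2.1 && PySem.Set.contains lb pr.2.2 then
                    PySem.Set.add params (pr.1 ++ "_" ++ A ++ "_" ++ B) else params
                if A != B && PySem.Set.contains la pr.2.2 && PySem.Set.contains lb pr.2.1 then
                  PySem.Set.add params (pr.1 ++ "_" ++ A ++ "_" ++ B) else params) params) params) s)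
      = PySem.Set.update s (l.flatMap (fun A => types_list.flatMap (fun B =>
          param_requires.flatMap (pvE1 A B (pvF orb_map A) (pvF orb_map B))))) := by
  have hin : ∀ (A : String) (l : List String) (s : PySem.Set String),
      (l.foldl (fun params B =>
        let la := orbital_types_from_list ((PySem.Dict.mk orb_map).getD A [])
        let lb := orbital_types_from_list ((PySem.Dict.mk orb_map).getD B [])
        if la.isEmpty || lb.isEmpty then params
        else
          param_requires.foldl (fun params pr =>
            if pr.2.1 = pr.2.2 then
              if PySem.Set.contains la pr.2.1 && PySem.Set.contains lb pr.2.2 then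
                PySem.Set.add params (pr.1 ++ "_" ++ PySem.Str.join "_" (PySem.List.sorted [A, B] (fun x => x) false))
              else params
            else
              let params := if PySem.Set.contains la pr.2.1 && PySem.Set.contains lb pr.2.2 then
                  PySem.Set.add params (pr.1 ++ "_" ++ A ++ "_" ++ B) else params
              if A != B && PySem.Set.contains la pr.2.2 && PySem.Set.contains lb pr.2.1 then
                PySem.Set.add params (pr.1 ++ "_" ++ A ++ "_" ++ B) else params) params) s)
      = PySem.Set.update s (l.flatMap (fun B =>
          param_requires.flatMap (pvE1 A B (pvF orb_map A) (pvF orb_map B)))) := by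
    intro A l
    induction l with
    | nil => intro s; simp [PySem.Set.update, List.foldl]
    | cons b l ih =>
      intro s
      simp only [List.foldl_cons, List.flatMap_cons]
      rw [ih, PySem.Set.update_append]
      congr 1
      exact pvPairStep A b (pvF orb_map A) (pvF orb_map b) s
  intro l
  induction l with
  | nil => intro s; simp [PySem.Set.update, List.foldl]
  | cons a l ih =>
    intro s
    simp only [List.foldl_cons, List.flatMap_cons]
    rw [ih, PySem.Set.update_append]
    congr 1
    exact hin a types_list s

-- the state after B's index-building fold: the dict entry at c and the accumulated keys
theorem pvIdxFold (orb_map : List (String × List String)) :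
    ∀ (l : List String) (d : PySem.Dict Char (List String)) (k : List String),
      (∀ c, c = 's' ∨ c = 'p' ∨ c = 'd' →
        ((l.foldl (fun st t =>
            let tset := orbital_types_from_list ((PySem.Dict.mk orb_map).getD t [])
            "spd".toList.foldl (fun st c =>
              if PySem.Set.contains tset c then
                (st.1.modify c [] (fun l => l ++ [t]), st.2 ++ ["E_" ++ String.singleton c ++ "_" ++ t])
              else st) st) (d, k)).1.getD c []
          = d.getD c [] ++ l.filter (fun t => PySem.Set.contains (pvF orb_map t) c)))
      ∧ ((l.foldl (fun st t =>
            let tset := orbital_types_from_list ((PySem.Dict.mk orb_map).getD t [])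
            "spd".toList.foldl (fun st c =>
              if PySem.Set.contains tset c then
                (st.1.modify c [] (fun l => l ++ [t]), st.2 ++ ["E_" ++ String.singleton c ++ "_" ++ t])
              else st) st) (d, k)).2
          = k ++ l.flatMap (fun t => pvOnsiteKeys (pvF orb_map t) t)) := by
  intro l
  induction l with
  | nil => intro d k; exact ⟨fun c _ => by simp, by simp⟩
  | cons t l ih =>
    intro d k
    have hspd : "spd".toList = ['s', 'p', 'd'] := rfl
    -- one step of the outer fold
    have hstep : ∀ (d : PySem.Dict Char (List String)) (k : List String),
        ("spd".toList.foldl (fun st c =>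
            if PySem.Set.contains (orbital_types_from_list ((PySem.Dict.mk orb_map).getD t [])) c then
              (st.1.modify c [] (fun l => l ++ [t]), st.2 ++ ["E_" ++ String.singleton c ++ "_" ++ t])
            else st) (d, k))
          = (("spd".toList.filter (fun c => PySem.Set.contains (pvF orb_map t) c)).foldl
               (fun d c => d.modify c [] (fun l => l ++ [t])) d,
             k ++ pvOnsiteKeys (pvF orb_map t) t) := by
      intro d k
      rw [hspd]
      by_cases h1 : 's' ∈ orbital_types_from_list ((PySem.Dict.mk orb_map).getD t []) <;>
        by_cases h2 : 'p' ∈ orbital_types_from_list ((PySem.Dict.mk orb_map).getD t []) <;>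
        by_cases h3 : 'd' ∈ orbital_types_from_list ((PySem.Dict.mk orb_map).getD t []) <;>
        simp [pvF, pvOnsiteKeys, h1, h2, h3, List.foldl, List.filter]
    simp only [List.foldl_cons, List.flatMap_cons, List.filter_cons]
    rw [hstep d k]
    obtain ⟨ihd, ihk⟩ := ih (("spd".toList.filter (fun c => PySem.Set.contains (pvF orb_map t) c)).foldl
        (fun d c => d.modify c [] (fun l => l ++ [t])) d) (k ++ pvOnsiteKeys (pvF orb_map t) t)
    refine ⟨fun c hc => ?_, by rw [ihk, List.append_assoc]⟩
    rw [ihd c hc]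
    have hgd : (("spd".toList.filter (fun c => PySem.Set.contains (pvF orb_map t) c)).foldl
        (fun d c => d.modify c [] (fun l => l ++ [t])) d).getD c []
        = d.getD c [] ++ (if PySem.Set.contains (pvF orb_map t) c then [t] else []) := by
      rw [hspd]
      rcases hc with hc | hc | hc <;> subst hc <;>
        by_cases h1 : 's' ∈ orbital_types_from_list ((PySem.Dict.mk orb_map).getD t []) <;>
        by_cases h2 : 'p' ∈ orbital_types_from_list ((PySem.Dict.mk orb_map).getD t []) <;>
        by_cases h3 : 'd' ∈ orbital_types_from_list ((PySem.Dict.mk orb_map).getD t []) <;>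
        simp [pvF, h1, h2, h3, List.filter, List.foldl, PySem.Dict.getD_modify]
    rw [hgd]
    by_cases h : c ∈ orbital_types_from_list ((PySem.Dict.mk orb_map).getD t []) <;>
      simp [pvF, h, List.append_assoc]

-- B's pname-major pair pass = appending the flattened pvBP emissions
theorem pvBPairFold (W : Char → List String) :
    ∀ (l : List (String × Char × Char)) (keys : List String),
      (l.foldl (fun keys pr =>
        if pr.2.1 = pr.2.2 then
          (W pr.2.1).foldl (fun keys A =>
            (W pr.2.1).foldl (fun keys B =>
              keys ++ [pr.1 ++ "_" ++ (if B < A then B else A) ++ "_" ++ (if A < B then B else A)]) keys) keys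
        else
          (W pr.2.2).foldl (fun keys X =>
            (W pr.2.1).foldl (fun keys Y =>
              if X != Y then keys ++ [pr.1 ++ "_" ++ X ++ "_" ++ Y] else keys) keys)
            ((W pr.2.1).foldl (fun keys A =>
              (W pr.2.2).foldl (fun keys B =>
                keys ++ [pr.1 ++ "_" ++ A ++ "_" ++ B]) keys) keys)) keys)
      = keys ++ l.flatMap (pvBP W) := by
  have hif : ∀ (X : String) (l : List String) (keys : List String) (f : String → String),
      l.foldl (fun keys Y => if X != Y then keys ++ [f Y] else keys) keys
        = keys ++ l.flatMap (fun Y => if X != Y then [f Y] else []) := by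
    intro X l
    induction l with
    | nil => intro keys f; simp
    | cons a l ih =>
      intro keys f
      simp only [List.foldl_cons, List.flatMap_cons]
      by_cases h : (X != a) = true
      · rw [if_pos h, if_pos h, ih, List.append_assoc]
      · rw [if_neg h, if_neg h, ih]; simp
  have happ : ∀ (l : List String) (keys : List String) (f : String → String),
      l.foldl (fun keys Y => keys ++ [f Y]) keys = keys ++ l.flatMap (fun Y => [f Y]) := by
    intro l
    induction l with
    | nil => intro keys f; simp
    | cons a l ih =>
      intro keys f
      simp only [List.foldl_cons, List.flatMap_cons]
      rw [ih, List.append_assoc]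
  have hout : ∀ (lo li : List String) (keys : List String) (g : String → String → String),
      lo.foldl (fun keys A => li.foldl (fun keys B => keys ++ [g A B]) keys) keys
        = keys ++ lo.flatMap (fun A => li.flatMap (fun B => [g A B])) := by
    intro lo li
    induction lo with
    | nil => intro keys g; simp
    | cons a lo ih =>
      intro keys g
      simp only [List.foldl_cons, List.flatMap_cons]
      rw [happ li keys, ih, List.append_assoc]
  have houtif : ∀ (lo li : List String) (keys : List String) (g : String → String → String),
      lo.foldl (fun keys X => li.foldl (fun keys Y => if X != Y then keys ++ [g X Y] else keys) keys) keys
        = keys ++ lo.flatMap (fun X => li.flatMap (fun Y => if X != Y then [g X Y] else [])) := by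
    intro lo li
    induction lo with
    | nil => intro keys g; simp
    | cons a lo ih =>
      intro keys g
      simp only [List.foldl_cons, List.flatMap_cons]
      rw [hif a li keys, ih, List.append_assoc]
  have hstep : ∀ (keys : List String) (pr : String × Char × Char),
      (if pr.2.1 = pr.2.2 then
        (W pr.2.1).foldl (fun keys A =>
          (W pr.2.1).foldl (fun keys B =>
            keys ++ [pr.1 ++ "_" ++ (if B < A then B else A) ++ "_" ++ (if A < B then B else A)]) keys) keys
      else
        (W pr.2.2).foldl (fun keys X =>
          (W pr.2.1).foldl (fun keys Y =>
            if X != Y then keys ++ [pr.1 ++ "_" ++ X ++ "_" ++ Y] else keys) keys)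
          ((W pr.2.1).foldl (fun keys A =>
            (W pr.2.2).foldl (fun keys B =>
              keys ++ [pr.1 ++ "_" ++ A ++ "_" ++ B]) keys) keys))
      = keys ++ pvBP W pr := by
    intro keys pr
    unfold pvBP
    by_cases h : pr.2.1 = pr.2.2
    · rw [if_pos h, if_pos h, hout]
    · rw [if_neg h, if_neg h, hout, houtif, List.append_assoc]
  intro l
  induction l with
  | nil => intro keys; simp
  | cons a l ih =>
    intro keys
    simp only [List.foldl_cons, List.flatMap_cons]
    rw [hstep keys a, ih, List.append_assoc]

-- per-entry membership: A's all-pairs emissions for one entry = B's product over the index lists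
theorem pvMemPr (tl : List String) (F : String → PySem.Set Char) (pr : String × Char × Char) (x : String) :
    (∃ A ∈ tl, ∃ B ∈ tl, x ∈ pvE1 A B (F A) (F B) pr)
      ↔ x ∈ pvBP (fun c => tl.filter (fun t => PySem.Set.contains (F t) c)) pr := by
  unfold pvE1 pvBP
  by_cases h : pr.2.1 = pr.2.2
  · simp [h, List.mem_flatMap, List.mem_filter, List.mem_ite_nil_right,
      Bool.and_eq_true]
    constructor
    · rintro ⟨A, hA, B, hB, ⟨ha, hb⟩, hx⟩
      exact ⟨A, ⟨hA, ha⟩, B, ⟨hB, hb⟩, hx⟩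
    · rintro ⟨A, ⟨hA, ha⟩, B, ⟨hB, hb⟩, hx⟩
      exact ⟨A, hA, B, hB, ⟨ha, hb⟩, hx⟩
  · simp only [if_neg h, List.mem_append, List.mem_flatMap, List.mem_filter,
      List.mem_ite_nil_right, List.mem_singleton, Bool.and_eq_true, bne_iff_ne]
    constructor
    · rintro ⟨A, hA, B, hB, ⟨⟨ha, hb⟩, hx⟩ | ⟨⟨⟨hne, ha2⟩, hb1⟩, hx⟩⟩
      · exact Or.inl ⟨A, ⟨hA, ha⟩, B, ⟨hB, hb⟩, hx⟩
      · exact Or.inr ⟨A, ⟨hA, ha2⟩, B, ⟨hB, hb1⟩, hne, hx⟩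
    · rintro (⟨A, ⟨hA, ha⟩, B, ⟨hB, hb⟩, hx⟩ | ⟨X, ⟨hX, hx2⟩, Y, ⟨hY, hy1⟩, hne, hx⟩)
      · exact ⟨A, hA, B, hB, Or.inl ⟨⟨ha, hb⟩, hx⟩⟩
      · exact ⟨X, hX, Y, hY, Or.inr ⟨⟨⟨hne, hx2⟩, hy1⟩, hx⟩⟩

-- all-pairs emissions and pname-major emissions are the same set of pair keys
theorem pvMemPairs (tl : List String) (F : String → PySem.Set Char) (x : String) :
    (x ∈ tl.flatMap (fun A => tl.flatMap (fun B => param_requires.flatMap (pvE1 A B (F A) (F B)))))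
      ↔ x ∈ param_requires.flatMap (pvBP (fun c => tl.filter (fun t => PySem.Set.contains (F t) c))) := by
  simp only [List.mem_flatMap]
  constructor
  · rintro ⟨A, hA, B, hB, pr, hpr, hx⟩
    exact ⟨pr, hpr, (pvMemPr tl F pr x).mp ⟨A, hA, B, hB, hx⟩⟩
  · rintro ⟨pr, hpr, hx⟩
    obtain ⟨A, hA, B, hB, hx⟩ := (pvMemPr tl F pr x).mpr hx
    exact ⟨A, hA, B, hB, pr, hpr, hx⟩

-- ===== VERDICT (by name: the statement is the Claim_ definition above) =====
theorem generate_possible_params_spec : Claim_equal_generate_possible_params := by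
  intro types_list orb_map _
  unfold Spec_generate_possible_params
  unfold generate_possible_params generate_possible_params_alt
  simp only []
  rw [pvOnsiteFold orb_map types_list, pvPairOuterFold orb_map types_list types_list]
  set st := types_list.foldl (fun st t =>
      let tset := orbital_types_from_list ((PySem.Dict.mk orb_map).getD t [])
      "spd".toList.foldl (fun st c =>
        if PySem.Set.contains tset c then
          (st.1.modify c [] (fun l => l ++ [t]), st.2 ++ ["E_" ++ String.singleton c ++ "_" ++ t])
        else st) st)
    (PySem.Dict.mk [('s', []), ('p', []), ('d', [])], ["Delta", "m", "tol"]) with hst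
  have hIdx := pvIdxFold orb_map types_list (PySem.Dict.mk [('s', []), ('p', []), ('d', [])]) ["Delta", "m", "tol"]
  rw [← hst] at hIdx
  obtain ⟨hW, hK⟩ := hIdx
  rw [pvBPairFold (fun c => st.1.getD c []) param_requires st.2]
  rw [hK]
  have hget : ∀ c, c = 's' ∨ c = 'p' ∨ c = 'd' → st.1.getD c [] = pvW types_list orb_map c := by
    intro c hc
    rw [hW c hc]
    rcases hc with hc | hc | hc <;> subst hc <;> rfl
  have hbp : param_requires.flatMap (pvBP (fun c => st.1.getD c []))
      = param_requires.flatMap (pvBP (pvW types_list orb_map)) := by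
    apply List.flatMap_congr
    intro pr hpr
    fin_cases hpr <;> simp only [pvBP] <;>
      simp only [hget 's' (by simp), hget 'p' (by simp), hget 'd' (by simp)]
  rw [hbp]
  have hupd : ∀ (l1 l2 l3 : List String),
      PySem.Set.update (PySem.Set.update (PySem.Set.update PySem.Set.empty l1) l2) l3
        = PySem.Set.ofList ((l1 ++ l2) ++ l3) := by
    intro l1 l2 l3
    rw [← PySem.Set.update_append, ← PySem.Set.update_append]
    simp [PySem.Set.update, PySem.Set.ofList_eq_foldl]
  rw [hupd]
  rw [PySem.List.sorted_id_eq_sorted_id_iff_perm]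
  apply (List.perm_ext_iff_of_nodup (PySem.Set.nodup_ofList _) (PySem.Set.nodup_ofList _)).mpr
  intro x
  simp only [PySem.Set.mem_ofList, List.mem_append]
  have hpair := pvMemPairs types_list (pvF orb_map) x
  rw [show (fun c => List.filter (fun t => PySem.Set.contains (pvF orb_map t) c) types_list)
      = pvW types_list orb_map from rfl] at hpair
  simp only [List.mem_flatMap] at hpair
  simp only [List.mem_flatMap]
  exact or_congr Iff.rfl hpair
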